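-- pv_equiv track=rewrite | github.com/VilaNova0/MC521 | codes/march 10/problem_h.py | check
-- ===== SOURCE A (Python) =====
-- def check(w, l):
--     c = 0; count = 0
--     while c < l:
--         if not count % 2:
--             c += 1
--         else:
--             if c+1 < l:
--                 if w[c] != w[c+1]:
--                     return False
--                 else:
--                     c += 2
--             else:
--                 return False
--         count += 1
--     return True
-- ===== SOURCE B (Python) =====
-- def check(w, l):
--     for i in range(1, l, 3):
--         if i + 1 >= l or w[i] != w[i + 1]:
--             return False
--     return True
-- ===== Notes on version B (the rewrite author's own statement) =====
-- stated objective: simpler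
-- what changed: Replaces A's parity-toggling while-loop state machine (c/count counters, mod-2 branch) with a single for-loop over the stride-3 index range range(1, l, 3), keeping the same bounds guard and comparisons; Pre_ excludes exactly the inputs where A raises IndexError, and B raises there too.
import Mathlib
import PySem

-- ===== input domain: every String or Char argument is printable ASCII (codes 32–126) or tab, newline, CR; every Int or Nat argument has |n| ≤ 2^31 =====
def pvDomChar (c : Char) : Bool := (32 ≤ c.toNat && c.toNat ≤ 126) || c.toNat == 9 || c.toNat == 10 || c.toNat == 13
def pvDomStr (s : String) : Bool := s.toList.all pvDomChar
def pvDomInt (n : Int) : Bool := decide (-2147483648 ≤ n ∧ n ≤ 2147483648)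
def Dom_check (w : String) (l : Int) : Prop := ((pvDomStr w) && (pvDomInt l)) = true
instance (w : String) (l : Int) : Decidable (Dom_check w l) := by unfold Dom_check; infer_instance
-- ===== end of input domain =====

-- B replaces A's parity-toggling while-loop state machine by a single for-loop over the
-- stride-3 indices range(1, l, 3) (objective: simpler).


-- ===== PORT A =====
def checkLoop (cs : List Char) (l : Int) (c : Int) (count : Nat) : Bool :=
  if c < l then
    if count % 2 = 0 then
      checkLoop cs l (c + 1) (count + 1)
    else
      if c + 1 < l then
        match PySem.List.pyGet? cs c, PySem.List.pyGet? cs (c + 1) with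
        | some x, some y => if x ≠ y then false else checkLoop cs l (c + 2) (count + 1)
        | _, _ => false   -- Python raises IndexError here; such inputs are outside Pre_check
      else false
  else true
termination_by (l - c).toNat
decreasing_by all_goals omega

def check (w : String) (l : Int) : Bool := checkLoop w.toList l 0 0

-- ===== PORT B =====
def checkAltLoop (cs : List Char) (l : Int) : List Int → Bool
  | [] => true
  | i :: rest =>
    if i + 1 ≥ l then false
    else
      match PySem.List.pyGet? cs i, PySem.List.pyGet? cs (i + 1) with
      | some x, some y => if x ≠ y then false else checkAltLoop cs l rest
      | _, _ => false   -- Python raises IndexError here; such inputs are outside Pre_check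

def check_alt (w : String) (l : Int) : Bool := checkAltLoop w.toList l (PySem.List.pyRange 1 l 3)

-- ===== PRECONDITION & SPEC =====
-- Pre_check excludes exactly the inputs on which A raises IndexError (its stride scan is
-- driven past the end of w because l exceeds the reachable indices); B raises there too.
def Pre_check (w : String) (l : Int) : Prop :=
  ¬ ((∀ j ∈ PySem.List.pyRange 1 ((w.toList.length : Int) - 1) 3,
        PySem.List.pyGet? w.toList j = PySem.List.pyGet? w.toList (j + 1)) ∧
     ∃ i ∈ [(w.toList.length : Int) - 1, (w.toList.length : Int), (w.toList.length : Int) + 1],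
        1 ≤ i ∧ i % 3 = 1 ∧ i + 1 < l)
instance (w : String) (l : Int) : Decidable (Pre_check w l) := by unfold Pre_check; infer_instance

def pvWitness_check : String × Int := ("abba", 4)

def Spec_check (w : String) (l : Int) (out : Bool) : Prop := out = check_alt w l
instance (w : String) (l : Int) (out : Bool) : Decidable (Spec_check w l out) := by unfold Spec_check; infer_instance

-- ===== CLAIM (what is proved, stated in full; the proofs are below) =====
def Claim_equal_check : Prop := ∀ (w : String) (l : Int), Dom_check w l → Pre_check w l → Spec_check w l (check w l)

-- ===== LEMMAS AND PROOFS =====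

-- pyRange with step 3: nil and cons unfolding lemmas
theorem pyRange3_nil (a b : Int) (h : b ≤ a) : PySem.List.pyRange a b 3 = [] := by
  rw [PySem.List.pyRange_of_pos a b (by norm_num)]
  simp [if_neg (by omega : ¬ a < b)]

theorem pyRange3_cons (a b : Int) (h : a < b) :
    PySem.List.pyRange a b 3 = a :: PySem.List.pyRange (a + 3) b 3 := by
  rw [PySem.List.pyRange_of_pos a b (by norm_num), PySem.List.pyRange_of_pos (a + 3) b (by norm_num)]
  by_cases h3 : a + 3 < b
  · rw [if_pos h, if_pos h3]
    have hn : ((b - a + 3 - 1) / 3).toNat = ((b - (a + 3) + 3 - 1) / 3).toNat + 1 := by omega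
    rw [hn, List.range_succ_eq_map]
    simp only [List.map_cons, List.map_map]
    congr 1
    · norm_num
    · apply List.map_congr_left
      intro k _
      simp only [Function.comp_apply]
      push_cast
      ring
  · rw [if_pos h, if_neg h3]
    have hn : ((b - a + 3 - 1) / 3).toNat = 1 := by omega
    rw [hn]
    simp

-- the main invariant: A's loop from an even-count state c equals B's scan of range(c+1, l, 3)
theorem loop_eq (cs : List Char) (l : Int) :
    ∀ (k : Nat) (c : Int) (cnt : Nat), (l - c).toNat ≤ k → cnt % 2 = 0 →
      checkLoop cs l c cnt = checkAltLoop cs l (PySem.List.pyRange (c + 1) l 3) := by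
  intro k
  induction k with
  | zero =>
    intro c cnt hk _
    have hc : ¬ c < l := by omega
    rw [checkLoop, if_neg hc, pyRange3_nil _ _ (by omega), checkAltLoop]
  | succ k ih =>
    intro c cnt hk hcnt
    by_cases hc : c < l
    · rw [checkLoop, if_pos hc, if_pos hcnt, checkLoop]
      by_cases hc1 : c + 1 < l
      · rw [if_pos hc1]
        have hodd : ¬ (cnt + 1) % 2 = 0 := by omega
        rw [if_neg hodd]
        by_cases hc2 : c + 1 + 1 < l
        · rw [if_pos hc2, pyRange3_cons _ _ hc1, checkAltLoop, if_neg (by omega)]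
          cases hg1 : PySem.List.pyGet? cs (c + 1) with
          | none => rfl
          | some x =>
            cases hg2 : PySem.List.pyGet? cs (c + 1 + 1) with
            | none => rfl
            | some y =>
              dsimp only
              by_cases hxy : x ≠ y
              · rw [if_pos hxy, if_pos hxy]
              · rw [if_neg hxy, if_neg hxy]
                have : c + 1 + 3 = (c + 1 + 2) + 1 := by ring
                rw [this]
                exact ih (c + 1 + 2) (cnt + 1 + 1) (by omega) (by omega)
        · rw [if_neg hc2, pyRange3_cons _ _ hc1, checkAltLoop, if_pos (by omega)]
      · rw [if_neg hc1, pyRange3_nil _ _ (by omega), checkAltLoop]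
    · rw [checkLoop, if_neg hc, pyRange3_nil _ _ (by omega), checkAltLoop]

-- ===== VERDICT (by name: the statement is the Claim_ definition above) =====
theorem check_spec : Claim_equal_check := by
  intro w l _dom _pre
  unfold Spec_check check check_alt
  have h := loop_eq w.toList l (l - 0).toNat 0 0 (le_refl _) (by norm_num)
  simpa using h
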